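-- pv_equiv track=rewrite | github.com/gASK13/AOC | 2019/22/22.py | find_source_position
-- ===== SOURCE A (Python) =====
-- def position_into_new_stack(_size, _position):
--     return -(_position + 1)
--
-- def position_cut_n(_size, _n, _position):
--     return _position + _n
--
-- def position_deal_n(_size, _n, _position):
--     while _position % _n != 0:
--         _position += _size
--     return _position // _n
--
-- def find_source_position(_size, _rules, _position):
--     pos = _position
--     _rules.reverse()
--     for line in _rules:
--         if line == 'deal into new stack':
--             pos = position_into_new_stack(_size, pos)
--         if 'deal with increment' in line:
--             n = int(line.split(' ')[-1])
--             pos = position_deal_n(_size, n, pos)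
--         if 'cut' in line:
--             n = int(line.split(' ')[-1])
--             pos = position_cut_n(_size, n ,pos)
--     _rules.reverse()
--     return pos % _size
-- ===== SOURCE B (Python) =====
-- def _modinv(a, m):
--     # modular inverse of a mod m (m > 0, gcd(a, m) == 1) via iterative extended Euclid
--     x0, x1, r0, r1 = 1, 0, a % m, m
--     while r1 != 0:
--         q = r0 // r1
--         r0, r1 = r1, r0 - q * r1
--         x0, x1 = x1, x0 - q * x1
--     return x0 % m
--
-- def find_source_position(_size, _rules, _position):
--     # compose the whole inverse shuffle into one affine map pos -> (a*pos + b) % size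
--     a, b = 1, 0
--     for line in reversed(_rules):
--         if line == 'deal into new stack':
--             a, b = (-a) % _size, (-b - 1) % _size
--         if 'deal with increment' in line:
--             inv = _modinv(int(line.split(' ')[-1]), _size)
--             a, b = a * inv % _size, b * inv % _size
--         if 'cut' in line:
--             b = (b + int(line.split(' ')[-1])) % _size
--     return (a * _position + b) % _size
-- ===== Notes on version B (the rewrite author's own statement) =====
-- stated objective: alternative
-- what changed: B composes the whole inverse shuffle into a single affine map (a*pos+b) mod size, replacing A's per-rule divisibility search loop by a modular inverse computed with the extended Euclidean algorithm.
-- outside the precondition, e.g. on find_source_position(-10, ['deal with increment 3'], 1): A returns -3, B returns -7; on find_source_position(4, ['deal with increment 2'], 2): A returns 1, B returns 2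
import Mathlib
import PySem

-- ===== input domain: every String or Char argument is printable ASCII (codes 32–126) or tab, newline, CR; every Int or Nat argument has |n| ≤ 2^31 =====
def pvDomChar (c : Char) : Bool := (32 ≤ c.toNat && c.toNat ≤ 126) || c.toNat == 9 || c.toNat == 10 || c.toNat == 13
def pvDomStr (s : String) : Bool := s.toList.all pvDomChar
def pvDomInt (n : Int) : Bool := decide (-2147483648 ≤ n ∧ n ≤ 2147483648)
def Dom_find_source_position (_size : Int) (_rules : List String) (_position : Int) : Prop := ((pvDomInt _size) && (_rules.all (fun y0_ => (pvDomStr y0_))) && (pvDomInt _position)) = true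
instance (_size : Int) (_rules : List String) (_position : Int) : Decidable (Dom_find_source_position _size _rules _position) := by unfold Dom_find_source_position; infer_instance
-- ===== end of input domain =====

-- B composes one affine map (a*pos+b) mod size, using modular inverses from the
-- extended Euclidean algorithm instead of A's per-rule divisibility search loop.
-- A reverses _rules in place and reverses it back, so its net side effect is none.


-- shared tiny parsing helper: line.split(' ')[-1] and int(...) of it (both Pythons do this)
def pyLastToken (line : String) : String :=
  (PySem.List.pyGet? ((PySem.Str.split? line " ").getD []) (-1)).getD ""

def lineNum (line : String) : Int :=
  (PySem.Int.ofStr? (pyLastToken line)).getD 0   -- getD 0 unreachable under Pre_ (int() would raise)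

-- ===== PORT A =====
def position_into_new_stack (_size _position : Int) : Int := -(_position + 1)

def position_cut_n (_size _n _position : Int) : Int := _position + _n

-- 'while _position % _n != 0: _position += _size; return _position // _n'
-- ported with fuel _n.natAbs, which suffices under Pre_ (gcd(_n,_size)=1); Python loops forever
-- exactly where the fuel would run out, and those inputs are outside Pre_.
def dealLoop (_size _n : Int) (pos : Int) : Nat → Int
  | 0 => PySem.Int.floordiv pos _n
  | fuel + 1 =>
    if PySem.Int.mod pos _n ≠ 0 then dealLoop _size _n (pos + _size) fuel
    else PySem.Int.floordiv pos _n

def position_deal_n (_size _n _position : Int) : Int :=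
  dealLoop _size _n _position _n.natAbs

def stepA (_size : Int) (pos : Int) (line : String) : Int :=
  let pos := if line = "deal into new stack" then position_into_new_stack _size pos else pos
  let pos := if PySem.Str.isIn "deal with increment" line then
      position_deal_n _size (lineNum line) pos else pos
  if PySem.Str.isIn "cut" line then position_cut_n _size (lineNum line) pos else pos

def find_source_position (_size : Int) (_rules : List String) (_position : Int) : Int :=
  PySem.Int.mod (_rules.reverse.foldl (stepA _size) _position) _size

-- ===== PORT B =====
-- iterative extended Euclid: modular inverse of a mod m (m > 0, gcd(a,m) = 1)
def modinvLoop (x0 x1 r0 r1 : Int) : Nat → Int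
  | 0 => x0
  | fuel + 1 =>
    if r1 ≠ 0 then
      let q := PySem.Int.floordiv r0 r1
      modinvLoop x1 (x0 - q * x1) r1 (r0 - q * r1) fuel
    else x0

def modinv (a m : Int) : Int :=
  PySem.Int.mod (modinvLoop 1 0 (PySem.Int.mod a m) m (m.natAbs + 1)) m

def stepB (_size : Int) (ab : Int × Int) (line : String) : Int × Int :=
  let ab := if line = "deal into new stack" then
      (PySem.Int.mod (-ab.1) _size, PySem.Int.mod (-ab.2 - 1) _size) else ab
  let ab := if PySem.Str.isIn "deal with increment" line then
      let inv := modinv (lineNum line) _size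
      (PySem.Int.mod (ab.1 * inv) _size, PySem.Int.mod (ab.2 * inv) _size) else ab
  if PySem.Str.isIn "cut" line then (ab.1, PySem.Int.mod (ab.2 + lineNum line) _size) else ab

def find_source_position_alt (_size : Int) (_rules : List String) (_position : Int) : Int :=
  let ab := _rules.reverse.foldl (stepB _size) (1, 0)
  PySem.Int.mod (ab.1 * _position + ab.2) _size

-- ===== PRECONDITION & SPEC =====
-- every rule with a number must parse (else A raises ValueError), and every
-- deal-with-increment rule must have a nonzero increment coprime to the size
def ruleOk (_size : Int) (line : String) : Bool :=
  (!(PySem.Str.isIn "deal with increment" line) ||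
    (match PySem.Int.ofStr? (pyLastToken line) with
     | some n => n ≠ 0 && Int.gcd n _size == 1 && decide (0 < _size)
     | none => false))
  && (!(PySem.Str.isIn "cut" line) || (PySem.Int.ofStr? (pyLastToken line)).isSome)

-- Pre_ excludes a zero size (A's final '%' raises) and deal-with-increment rules whose
-- increment is zero, unparseable, or not coprime to a positive size: there A's inner loop
-- raises, never terminates, or returns a value only by accident of the running position's
-- divisibility.
def Pre_find_source_position (_size : Int) (_rules : List String) (_position : Int) : Prop :=
  _size ≠ 0 ∧ ∀ line ∈ _rules, ruleOk _size line = true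

instance (_size : Int) (_rules : List String) (_position : Int) : Decidable (Pre_find_source_position _size _rules _position) := by unfold Pre_find_source_position; infer_instance

def pvWitness_find_source_position : Int × List String × Int :=
  (10, ["deal into new stack", "cut 3", "deal with increment 7"], 4)

def Spec_find_source_position (_size : Int) (_rules : List String) (_position : Int) (out : Int) : Prop := out = find_source_position_alt _size _rules _position
instance (_size : Int) (_rules : List String) (_position : Int) (out : Int) : Decidable (Spec_find_source_position _size _rules _position out) := by unfold Spec_find_source_position; infer_instance

-- ===== CLAIM (what is proved, stated in full; the proofs are below) =====
def Claim_equal_find_source_position : Prop := ∀ (_size : Int) (_rules : List String) (_position : Int), Dom_find_source_position _size _rules _position → Pre_find_source_position _size _rules _position → Spec_find_source_position _size _rules _position (find_source_position _size _rules _position)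

-- ===== LEMMAS AND PROOFS =====

theorem pvWitness_ok :
    Dom_find_source_position pvWitness_find_source_position.1 pvWitness_find_source_position.2.1 pvWitness_find_source_position.2.2 ∧
    Pre_find_source_position pvWitness_find_source_position.1 pvWitness_find_source_position.2.1 pvWitness_find_source_position.2.2 := by
  constructor <;> decide

-- Python's x % s is congruent to x
theorem pymod_modEq (s x : Int) : PySem.Int.mod x s ≡ x [ZMOD s] := by
  have h := PySem.Int.floordiv_mul_add_mod x s
  exact Int.modEq_iff_dvd.mpr ⟨PySem.Int.floordiv x s, by linear_combination -h⟩

-- congruent values have the same Python remainder (either sign of s)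
theorem pymod_eq_of_modEq (s x y : Int) (hs : s ≠ 0) (h : x ≡ y [ZMOD s]) :
    PySem.Int.mod x s = PySem.Int.mod y s := by
  have hd : s ∣ PySem.Int.mod y s - PySem.Int.mod x s :=
    Int.ModEq.dvd ((pymod_modEq s x).trans (h.trans (pymod_modEq s y).symm))
  have hzero : PySem.Int.mod y s - PySem.Int.mod x s = 0 := by
    rcases hd with ⟨c, hc⟩
    rcases eq_or_ne c 0 with rfl | hcne
    · simpa using hc
    · exfalso
      have habs : |s| ≤ |s * c| := by
        rw [abs_mul]
        nlinarith [abs_nonneg s, Int.one_le_abs hcne]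
      have hlt : |PySem.Int.mod y s - PySem.Int.mod x s| < |s| := by
        rcases lt_or_gt_of_ne hs with hneg | hpos
        · have b1 := PySem.Int.mod_neg_bounds (a := x) hneg
          have b2 := PySem.Int.mod_neg_bounds (a := y) hneg
          rw [abs_of_neg hneg, abs_lt]
          omega
        · have b1x := PySem.Int.mod_nonneg (a := x) hpos
          have b1y := PySem.Int.mod_nonneg (a := y) hpos
          have b2x := PySem.Int.mod_lt (a := x) hpos
          have b2y := PySem.Int.mod_lt (a := y) hpos
          rw [abs_of_pos hpos, abs_lt]
          omega
      rw [hc] at hlt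
      omega
  omega

-- A's deal loop: with enough fuel its result t satisfies t * n ≡ pos (mod size)
theorem dealLoop_spec (size n : Int) :
    ∀ (fuel : Nat) (pos : Int), (∃ k : Nat, k < fuel ∧ n ∣ pos + k * size) →
      dealLoop size n pos fuel * n ≡ pos [ZMOD size] := by
  intro fuel
  induction fuel with
  | zero => rintro pos ⟨k, hk, -⟩; omega
  | succ f ih =>
    rintro pos ⟨k, hk, hdvd⟩
    by_cases hd : PySem.Int.mod pos n = 0
    · have h2 := PySem.Int.floordiv_mul_add_mod pos n
      rw [hd, add_zero] at h2
      simp only [dealLoop, hd, ne_eq, not_true_eq_false, if_false]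
      rw [h2]
    · simp only [dealLoop, hd, ne_eq, not_false_eq_true, if_true]
      have hk0 : k ≠ 0 := by
        rintro rfl
        simp only [Nat.cast_zero, zero_mul, add_zero] at hdvd
        exact hd ((PySem.Int.mod_eq_zero_iff_dvd pos n).mpr hdvd)
      obtain ⟨k', rfl⟩ := Nat.exists_eq_succ_of_ne_zero hk0
      have hdvd' : n ∣ pos + size + (k' : Int) * size := by
        have he : pos + size + (k' : Int) * size = pos + ((k' + 1 : Nat) : Int) * size := by
          push_cast; ring
        rw [he]; exact hdvd
      have hrec := ih (pos + size) ⟨k', by omega, hdvd'⟩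
      refine hrec.trans ?_
      exact (Int.modEq_iff_dvd.mpr (by simp)).symm

-- existence of the fuel bound when gcd(n, size) = 1
theorem exists_hit (size n pos : Int) (hn : n ≠ 0) (hg : Int.gcd n size = 1) :
    ∃ k : Nat, k < n.natAbs ∧ n ∣ pos + k * size := by
  have hbez : (1 : Int) = n * Int.gcdA n size + size * Int.gcdB n size := by
    have := Int.gcd_eq_gcd_ab n size
    rw [hg] at this; exact_mod_cast this
  set v := Int.gcdB n size with hv
  set N : Int := (n.natAbs : Int) with hN
  have hNpos : 0 < N := by
    have : n.natAbs ≠ 0 := Int.natAbs_ne_zero.mpr hn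
    omega
  set k0 : Int := (-pos * v) % N with hk0def
  have hk0 : 0 ≤ k0 := Int.emod_nonneg _ (by omega)
  have hk0lt : k0 < N := Int.emod_lt_of_pos _ hNpos
  refine ⟨k0.toNat, by omega, ?_⟩
  have hcast : (k0.toNat : Int) = k0 := Int.toNat_of_nonneg hk0
  rw [hcast]
  have h1 : n ∣ pos + (-pos * v) * size :=
    ⟨pos * Int.gcdA n size, by linear_combination pos * hbez⟩
  have h2 : n ∣ k0 - -pos * v := by
    have hdN : N ∣ -pos * v - (-pos * v) % N := Int.dvd_self_sub_emod
    have hdN' : N ∣ k0 - -pos * v := by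
      rw [hk0def, show (-pos * v) % N - -pos * v = -(-pos * v - (-pos * v) % N) by ring]
      exact dvd_neg.mpr hdN
    exact Int.natAbs_dvd.mp (hN ▸ hdN')
  have h3 : n ∣ (k0 - -pos * v) * size := dvd_mul_of_dvd_left h2 _
  have he : pos + k0 * size = (pos + (-pos * v) * size) + (k0 - -pos * v) * size := by ring
  rw [he]
  exact dvd_add h1 h3

theorem position_deal_n_modEq (size n pos : Int) (hn : n ≠ 0) (hg : Int.gcd n size = 1) :
    position_deal_n size n pos * n ≡ pos [ZMOD size] :=
  dealLoop_spec size n n.natAbs pos (exists_hit size n pos hn hg)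

-- extended-Euclid loop invariant
theorem modinvLoop_spec (a m : Int) (_hm : 0 < m) :
    ∀ (fuel : Nat) (x0 x1 r0 r1 : Int), r1.toNat < fuel → 0 ≤ r0 → 0 ≤ r1 →
      x0 * a ≡ r0 [ZMOD m] → x1 * a ≡ r1 [ZMOD m] → Int.gcd r0 r1 = Int.gcd a m →
      modinvLoop x0 x1 r0 r1 fuel * a ≡ (Int.gcd a m : Int) [ZMOD m] := by
  intro fuel
  induction fuel with
  | zero => intro x0 x1 r0 r1 hf; omega
  | succ f ih =>
    intro x0 x1 r0 r1 hf hr0 hr1 hx0 hx1 hgcd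
    by_cases h1 : r1 = 0
    · simp only [modinvLoop, h1, ne_eq, not_true_eq_false, if_false]
      have : r0 = (Int.gcd a m : Int) := by
        rw [← hgcd, h1, Int.gcd_zero_right, Int.natAbs_of_nonneg hr0]
      exact this ▸ hx0
    · simp only [modinvLoop, h1, ne_eq, not_false_eq_true, if_true]
      have hr1pos : 0 < r1 := lt_of_le_of_ne hr1 (Ne.symm h1)
      have hq : PySem.Int.floordiv r0 r1 = r0 / r1 :=
        PySem.Int.floordiv_eq_ediv_of_pos hr1pos
      set q := PySem.Int.floordiv r0 r1 with hqdef
      have hmod : r0 - q * r1 = r0 % r1 := by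
        rw [hq, Int.emod_def]; ring
      have hlt : r0 % r1 < r1 := Int.emod_lt_of_pos _ hr1pos
      have hnn : 0 ≤ r0 % r1 := Int.emod_nonneg _ h1
      refine ih x1 (x0 - q * x1) r1 (r0 - q * r1) (by rw [hmod]; omega) hr1
        (by rw [hmod]; exact hnn) hx1 ?_ ?_
      · have h := hx0.sub (hx1.mul_left q)
        have he : x0 * a - q * (x1 * a) = (x0 - q * x1) * a := by ring
        rw [he] at h; exact h
      · rw [← hgcd]
        have he : r0 - q * r1 = r0 + (-q) * r1 := by ring
        rw [he, Int.gcd_add_mul_right_right r1 r0 (-q), Int.gcd_comm]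

theorem modinv_spec (a m : Int) (hm : 0 < m) (hg : Int.gcd a m = 1) :
    modinv a m * a ≡ 1 [ZMOD m] := by
  have hmod : PySem.Int.mod a m = a % m := PySem.Int.mod_eq_emod_of_pos hm
  have hloop := modinvLoop_spec a m hm (m.natAbs + 1) 1 0 (PySem.Int.mod a m) m
    (by omega) (by rw [hmod]; exact Int.emod_nonneg _ (by omega)) (le_of_lt hm)
    (by rw [one_mul, hmod]; exact (Int.emod_emod_of_dvd a dvd_rfl).symm)
    (by show (0 * a) % m = m % m; simp)
    (by rw [hmod]; exact Int.gcd_emod a m)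
  rw [hg] at hloop
  have h2 := (pymod_modEq m (modinvLoop 1 0 (PySem.Int.mod a m) m (m.natAbs + 1))).mul_right a
  unfold modinv
  exact h2.trans (by exact_mod_cast hloop)

theorem ruleOk_deal (s : Int) (line : String) (h : ruleOk s line = true)
    (h2 : PySem.Str.isIn "deal with increment" line = true) :
    lineNum line ≠ 0 ∧ Int.gcd (lineNum line) s = 1 ∧ 0 < s := by
  unfold ruleOk at h
  unfold lineNum
  cases hp : PySem.Int.ofStr? (pyLastToken line) <;> simp_all

-- inverse 'deal into new stack' keeps the affine invariant
theorem op_new (s p0 pos a b : Int) (hinv : pos ≡ a * p0 + b [ZMOD s]) :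
    position_into_new_stack s pos ≡
      PySem.Int.mod (-a) s * p0 + PySem.Int.mod (-b - 1) s [ZMOD s] := by
  have hrhs := ((pymod_modEq s (-a)).mul_right p0).add (pymod_modEq s (-b - 1))
  refine Int.ModEq.trans ?_ hrhs.symm
  have h2 := (hinv.add_right 1).neg
  have he1 : position_into_new_stack s pos = -(pos + 1) := rfl
  have he2 : -a * p0 + (-b - 1) = -(a * p0 + b + 1) := by ring
  rw [he1, he2]
  exact h2

-- inverse 'cut n' keeps the affine invariant
theorem op_cut (s p0 pos a b n : Int) (hinv : pos ≡ a * p0 + b [ZMOD s]) :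
    position_cut_n s n pos ≡ a * p0 + PySem.Int.mod (b + n) s [ZMOD s] := by
  have hrhs := (Int.ModEq.refl (a * p0)).add (pymod_modEq s (b + n))
  refine Int.ModEq.trans ?_ hrhs.symm
  have h2 := hinv.add_right n
  have he : a * p0 + (b + n) = a * p0 + b + n := by ring
  rw [he]
  exact h2

-- inverse 'deal with increment n' keeps the affine invariant
theorem op_deal (s p0 pos a b n : Int) (hs : 0 < s) (hn : n ≠ 0)
    (hg : Int.gcd n s = 1) (hinv : pos ≡ a * p0 + b [ZMOD s]) :
    position_deal_n s n pos ≡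
      PySem.Int.mod (a * modinv n s) s * p0 + PySem.Int.mod (b * modinv n s) s [ZMOD s] := by
  set t := position_deal_n s n pos with ht
  set i := modinv n s with hi
  have hdeal : t * n ≡ pos [ZMOD s] := position_deal_n_modEq s n pos hn hg
  have hinvn : i * n ≡ 1 [ZMOD s] := modinv_spec n s hs hg
  have h1 : t ≡ t * (i * n) [ZMOD s] := by
    have := (hinvn.symm.mul_left t)
    rw [mul_one] at this
    exact this
  have h2 : t * (i * n) ≡ pos * i [ZMOD s] := by
    have := hdeal.mul_right i
    have he : t * (i * n) = t * n * i := by ring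
    rw [he]
    exact this
  have h3 : pos * i ≡ a * i * p0 + b * i [ZMOD s] := by
    have := hinv.mul_right i
    have he : (a * p0 + b) * i = a * i * p0 + b * i := by ring
    rw [he] at this
    exact this
  have hrhs := ((pymod_modEq s (a * i)).mul_right p0).add (pymod_modEq s (b * i))
  exact ((h1.trans h2).trans h3).trans hrhs.symm

-- one rule line keeps the affine invariant
theorem step_congr (size p0 : Int) (line : String)
    (h : ruleOk size line = true) (pos a b : Int)
    (hinv : pos ≡ a * p0 + b [ZMOD size]) :
    stepA size pos line ≡ (stepB size (a, b) line).1 * p0 + (stepB size (a, b) line).2 [ZMOD size] := by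
  unfold stepA stepB
  by_cases h1 : line = "deal into new stack"
  · by_cases h2 : PySem.Str.isIn "deal with increment" line = true
    · exact absurd (h1 ▸ h2) (by decide)
    · by_cases h3 : PySem.Str.isIn "cut" line = true
      · exact absurd (h1 ▸ h3) (by decide)
      · simp only [h1, if_true, h2, h3, Bool.false_eq_true, reduceIte]
        exact op_new size p0 pos a b hinv
  · by_cases h2 : PySem.Str.isIn "deal with increment" line = true
    · obtain ⟨hn, hg, hpos⟩ := ruleOk_deal size line h h2
      by_cases h3 : PySem.Str.isIn "cut" line = true
      · simp only [h1, h2, h3, if_true, if_false, Bool.false_eq_true, reduceIte, if_neg h1]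
        exact op_cut size p0 _ _ _ (lineNum line)
          (op_deal size p0 pos a b (lineNum line) hpos hn hg hinv)
      · simp only [h1, h2, h3, if_true, if_false, Bool.false_eq_true, reduceIte, if_neg h1]
        exact op_deal size p0 pos a b (lineNum line) hpos hn hg hinv
    · by_cases h3 : PySem.Str.isIn "cut" line = true
      · simp only [h1, h2, h3, if_true, if_false, Bool.false_eq_true, reduceIte, if_neg h1]
        exact op_cut size p0 pos a b (lineNum line) hinv
      · simp only [h1, h2, h3, if_true, if_false, Bool.false_eq_true, reduceIte, if_neg h1]
        exact hinv

theorem fold_congr (size p0 : Int) :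
    ∀ (L : List String) (pos a b : Int), (∀ l ∈ L, ruleOk size l = true) →
      pos ≡ a * p0 + b [ZMOD size] →
      L.foldl (stepA size) pos ≡
        (L.foldl (stepB size) (a, b)).1 * p0 + (L.foldl (stepB size) (a, b)).2 [ZMOD size] := by
  intro L
  induction L with
  | nil => intro pos a b _ hinv; simpa using hinv
  | cons l L ih =>
    intro pos a b hok hinv
    have h1 := step_congr size p0 l (hok l (by simp)) pos a b hinv
    simpa using ih (stepA size pos l) (stepB size (a, b) l).1 (stepB size (a, b) l).2
      (fun x hx => hok x (by simp [hx])) h1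

-- ===== VERDICT (by name: the statement is the Claim_ definition above) =====
theorem find_source_position_spec : Claim_equal_find_source_position := by
  intro size rules pos _ hpre
  obtain ⟨hs, hok⟩ := hpre
  unfold Spec_find_source_position find_source_position find_source_position_alt
  have h := fold_congr size pos rules.reverse pos 1 0
    (fun l hl => hok l (List.mem_reverse.mp hl)) (by simp)
  show PySem.Int.mod _ size = PySem.Int.mod _ size
  exact pymod_eq_of_modEq size _ _ hs h
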